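-- pv_equiv track=rewrite | github.com/acmattson3/pebble | web-interface/web-control.py | _normalize_soundboard_file_list
-- ===== SOURCE A (Python) =====
-- from typing import Any, Deque, Dict, Optional
--
-- def _normalize_soundboard_file_list(raw_list: Any) -> list[str]:
--     if not isinstance(raw_list, list):
--         return []
--     files: list[str] = []
--     for item in raw_list:
--         if not isinstance(item, str):
--             continue
--         clean = item.strip()
--         if not clean:
--             continue
--         if not clean.lower().endswith(".wav"):
--             continue
--         files.append(clean.replace("\\", "/"))
--     # Preserve original case while deduplicating by lowercase path.
--     dedup: Dict[str, str] = {}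
--     for file_name in files:
--         dedup[file_name.lower()] = file_name
--     return sorted(dedup.values(), key=lambda value: value.lower())
-- ===== SOURCE B (Python) =====
-- def _normalize_soundboard_file_list(raw_list):
--     if not isinstance(raw_list, list):
--         return []
--     files = [item.strip().replace("\\", "/") for item in raw_list
--              if isinstance(item, str) and item.strip()
--              and item.strip().lower().endswith(".wav")]
--     files.sort(key=str.lower)
--     # adjacent runs of equal lowercase key: stable sort keeps original order,
--     # so the last element of a run is the last occurrence (dict last-wins).
--     out = []
--     pending = None
--     for f in files:
--         if pending is not None and pending.lower() != f.lower():
--             out.append(pending)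
--         pending = f
--     if pending is not None:
--         out.append(pending)
--     return out
-- ===== Notes on version B (the rewrite author's own statement) =====
-- stated objective: alternative
-- what changed: Replaces A's lowercase-keyed dict (last value wins) followed by a sort of the dict values with a single stable sort of the whole normalized list by lowercase key followed by an adjacent-run scan that keeps the last element of each equal-key run; stability makes that last element A's dict value.
import Mathlib
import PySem

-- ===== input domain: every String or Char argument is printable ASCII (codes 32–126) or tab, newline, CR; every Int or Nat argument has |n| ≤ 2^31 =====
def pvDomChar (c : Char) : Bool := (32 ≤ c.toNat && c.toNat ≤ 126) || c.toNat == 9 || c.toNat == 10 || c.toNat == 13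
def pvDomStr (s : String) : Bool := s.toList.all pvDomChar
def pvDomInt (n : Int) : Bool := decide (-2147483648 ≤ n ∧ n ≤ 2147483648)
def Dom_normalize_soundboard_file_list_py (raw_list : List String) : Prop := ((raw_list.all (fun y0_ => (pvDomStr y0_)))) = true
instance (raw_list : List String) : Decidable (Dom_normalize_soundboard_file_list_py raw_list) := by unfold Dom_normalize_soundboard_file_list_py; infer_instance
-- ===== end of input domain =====

-- B replaces A's lowercase-keyed dict (last value wins, then a sort of the values) by a single
-- stable sort of all normalized names followed by an adjacent-run scan keeping the last of each
-- equal-lowercase run: same values, no dict (objective: alternative decomposition, same cost class).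

-- ===== PORT A =====
def normalize_soundboard_file_list_py (raw_list : List String) : List String :=
  -- 'for item in raw_list: …' filter/normalize loop (isinstance checks are vacuous on List String)
  let files := raw_list.foldl (fun acc item =>
    let clean := PySem.Str.strip item
    if clean = "" then acc
    else if PySem.Str.endswith (PySem.Str.lower clean) ".wav" = false then acc
    else acc ++ [PySem.Str.replace clean "\\" "/"]) []
  -- 'dedup[file_name.lower()] = file_name' loop
  let dedup := files.foldl (fun d f => d.insert (PySem.Str.lower f) f) PySem.Dict.empty
  PySem.List.sorted dedup.values (fun v => PySem.Str.lower v) false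

-- ===== PORT B =====
-- the comprehension's guard and element expression
def pvKeep (item : String) : Bool :=
  !(PySem.Str.strip item == "") && PySem.Str.endswith (PySem.Str.lower (PySem.Str.strip item)) ".wav"
def pvNorm (item : String) : String := PySem.Str.replace (PySem.Str.strip item) "\\" "/"
-- the adjacent-run loop's body: emit pending when the key changes
def pvStep (st : List String × Option String) (f : String) : List String × Option String :=
  match st with
  | (out, some p) => if PySem.Str.lower p ≠ PySem.Str.lower f then (out ++ [p], some f) else (out, some f)
  | (out, none) => (out, some f)
-- final 'if pending is not None: out.append(pending)'
def pvFlush : List String × Option String → List String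
  | (out, some p) => out ++ [p]
  | (out, none) => out

def normalize_soundboard_file_list_py_alt (raw_list : List String) : List String :=
  let files := (raw_list.filter pvKeep).map pvNorm
  let sortedFiles := PySem.List.sorted files (fun v => PySem.Str.lower v) false
  pvFlush (sortedFiles.foldl pvStep ([], none))

-- ===== PRECONDITION & SPEC =====
def Spec_normalize_soundboard_file_list_py (raw_list : List String) (out : List String) : Prop := out = normalize_soundboard_file_list_py_alt raw_list
instance (raw_list : List String) (out : List String) : Decidable (Spec_normalize_soundboard_file_list_py raw_list out) := by unfold Spec_normalize_soundboard_file_list_py; infer_instance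

-- ===== CLAIM (what is proved, stated in full; the proofs are below) =====
def Claim_equal_normalize_soundboard_file_list_py : Prop := ∀ (raw_list : List String), Dom_normalize_soundboard_file_list_py raw_list → Spec_normalize_soundboard_file_list_py raw_list (normalize_soundboard_file_list_py raw_list)

-- ===== LEMMAS AND PROOFS =====

-- "keep the last of each equal-key run", recursively (the loop pvStep/pvFlush computes this)
def pvR : List String → List String
  | [] => []
  | [f] => [f]
  | f :: g :: t =>
    if PySem.Str.lower g = PySem.Str.lower f then pvR (g :: t) else f :: pvR (g :: t)

theorem pvFold_eq_pvR_aux (s : List String) : ∀ (out : List String) (p : String),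
    pvFlush (s.foldl pvStep (out, some p)) = out ++ pvR (p :: s) := by
  induction s with
  | nil => intro out p; simp [pvFlush, pvR]
  | cons f t ih =>
    intro out p
    by_cases h : PySem.Str.lower f = PySem.Str.lower p
    · rw [List.foldl_cons]
      simp only [pvStep, ne_eq]
      rw [if_neg (by simp [h]), ih, pvR, if_pos h]
    · rw [List.foldl_cons]
      simp only [pvStep, ne_eq]
      rw [if_pos (fun e => h e.symm), ih, pvR, if_neg h]
      simp

theorem pvFold_eq_pvR (s : List String) :
    pvFlush (s.foldl pvStep ([], none)) = pvR s := by
  cases s with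
  | nil => rfl
  | cons f t =>
    simp only [List.foldl_cons, pvStep]
    simpa using pvFold_eq_pvR_aux t [] f

-- B's filter/map builds the same list as A's append loop
theorem pvFiles_eq (raw_list : List String) :
    raw_list.foldl (fun acc item =>
      let clean := PySem.Str.strip item
      if clean = "" then acc
      else if PySem.Str.endswith (PySem.Str.lower clean) ".wav" = false then acc
      else acc ++ [PySem.Str.replace clean "\\" "/"]) []
    = (raw_list.filter pvKeep).map pvNorm := by
  have hstep : (fun (acc : List String) item =>
      let clean := PySem.Str.strip item
      if clean = "" then acc
      else if PySem.Str.endswith (PySem.Str.lower clean) ".wav" = false then acc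
      else acc ++ [PySem.Str.replace clean "\\" "/"])
      = (fun acc item => if pvKeep item then acc ++ [pvNorm item] else acc) := by
    funext acc item
    simp only [pvKeep, pvNorm]
    by_cases h1 : PySem.Str.strip item = ""
    · rw [if_pos h1, h1]
      simp
    · rw [if_neg h1]
      have h1' : (PySem.Str.strip item == "") = false := by simp [h1]
      cases h2 : PySem.Str.endswith (PySem.Str.lower (PySem.Str.strip item)) ".wav" <;>
        simp [h1']
  rw [hstep, PySem.List.foldl_append_if, List.nil_append]

-- stability of the insertion sort: inserting x into a key-sorted list appends it to its key class
theorem pvFilter_insertBy (k : String) (x : String) (ys : List String)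
    (h : ys.Pairwise (fun a b => PySem.Str.lower a ≤ PySem.Str.lower b)) :
    (PySem.List.insertBy (fun a b => decide (PySem.Str.lower a < PySem.Str.lower b)) x ys).filter
        (fun f => PySem.Str.lower f == k)
    = if PySem.Str.lower x == k
        then ys.filter (fun f => PySem.Str.lower f == k) ++ [x]
        else ys.filter (fun f => PySem.Str.lower f == k) := by
  induction ys with
  | nil => by_cases hxk : PySem.Str.lower x = k <;> simp [PySem.List.insertBy, hxk]
  | cons y ys ih =>
    rcases List.pairwise_cons.mp h with ⟨hy, hys⟩
    by_cases hlt : PySem.Str.lower x < PySem.Str.lower y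
    · have hins : PySem.List.insertBy
          (fun a b => decide (PySem.Str.lower a < PySem.Str.lower b)) x (y :: ys)
          = x :: y :: ys := by
        simp only [PySem.List.insertBy, hlt, decide_true, if_true]
      rw [hins, List.filter_cons]
      by_cases hxk : PySem.Str.lower x = k
      · have hnil : (y :: ys).filter (fun f => PySem.Str.lower f == k) = [] := by
          rw [List.filter_eq_nil_iff]
          intro b hb
          have hle : PySem.Str.lower y ≤ PySem.Str.lower b := by
            rcases List.mem_cons.mp hb with rfl | hb'
            · exact le_refl _
            · exact hy b hb'
          simp only [beq_iff_eq]
          exact fun e => absurd (hxk ▸ e.symm) (ne_of_lt (lt_of_lt_of_le hlt hle))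
        rw [hnil]
        simp [hxk]
      · have hb : (PySem.Str.lower x == k) = false := by simp [hxk]
        rw [hb]
        simp
    · have hins : PySem.List.insertBy
          (fun a b => decide (PySem.Str.lower a < PySem.Str.lower b)) x (y :: ys)
          = y :: PySem.List.insertBy
              (fun a b => decide (PySem.Str.lower a < PySem.Str.lower b)) x ys := by
        simp only [PySem.List.insertBy, hlt, decide_false]
        simp
      rw [hins, List.filter_cons, ih hys, List.filter_cons]
      by_cases hyk : PySem.Str.lower y = k <;> by_cases hxk : PySem.Str.lower x = k <;>
        simp [hyk, hxk]

theorem pvSorted_filter (files : List String) (k : String) :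
    (PySem.List.sorted files (fun v => PySem.Str.lower v) false).filter
        (fun f => PySem.Str.lower f == k)
    = files.filter (fun f => PySem.Str.lower f == k) := by
  induction files using List.reverseRecOn with
  | nil => simp [PySem.List.sorted_eq_foldl_insertBy]
  | append_singleton files x ih =>
    rw [PySem.List.sorted_eq_foldl_insertBy, List.foldl_append, List.foldl_cons, List.foldl_nil,
      ← PySem.List.sorted_eq_foldl_insertBy,
      pvFilter_insertBy k x _ (PySem.List.sorted_pairwise files (fun v => PySem.Str.lower v)),
      List.filter_append]
    by_cases hxk : PySem.Str.lower x = k <;> simp [hxk, ih]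

-- the dict's entry at k is the last element of files whose lowercase is k
theorem pvGetD_foldl_insert (files : List String) : ∀ (d : PySem.Dict String String) (k : String),
    (files.foldl (fun d f => d.insert (PySem.Str.lower f) f) d).getD k ""
    = ((files.filter (fun f => PySem.Str.lower f == k)).getLast?).getD (d.getD k "") := by
  induction files with
  | nil => intro d k; simp
  | cons f t ih =>
    intro d k
    simp only [List.foldl_cons, List.filter_cons, ih]
    by_cases h : PySem.Str.lower f = k
    · rw [if_pos (by simp [h]), PySem.Dict.getD_insert, if_pos h.symm, List.getLast?_cons,
        Option.getD_some]
    · rw [if_neg (by simp [h]), PySem.Dict.getD_insert, if_neg (fun e => h e.symm)]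

theorem pvKeys_eq (files : List String) :
    (files.foldl (fun d f => d.insert (PySem.Str.lower f) f) PySem.Dict.empty).keys
    = PySem.Set.ofList (files.map (fun f => PySem.Str.lower f)) := by
  rw [PySem.Dict.keys_foldl_insert_key files (fun f => PySem.Str.lower f) (fun _ f => f)
    PySem.Dict.empty, PySem.Dict.keys_empty]
  rfl

theorem pvKeys_nodup (files : List String) :
    (files.foldl (fun d f => d.insert (PySem.Str.lower f) f) PySem.Dict.empty).keys.Nodup :=
  PySem.Dict.nodup_keys_foldl_insert_key files (fun f => PySem.Str.lower f) (fun _ f => f)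
    PySem.Dict.empty (by rw [PySem.Dict.keys_empty]; exact List.nodup_nil)

-- any key of the dict names a nonempty filter class whose last element carries that key
theorem pvKey_class (files : List String) (k : String)
    (hk : k ∈ (files.foldl (fun d f => d.insert (PySem.Str.lower f) f) PySem.Dict.empty).keys) :
    ∃ w, (files.filter (fun f => PySem.Str.lower f == k)).getLast? = some w ∧
      PySem.Str.lower w = k := by
  rw [pvKeys_eq, PySem.Set.mem_ofList, List.mem_map] at hk
  rcases hk with ⟨f, hf, rfl⟩
  have hfmem : f ∈ files.filter (fun g => PySem.Str.lower g == PySem.Str.lower f) := by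
    simp [List.mem_filter, hf]
  have hne : files.filter (fun g => PySem.Str.lower g == PySem.Str.lower f) ≠ [] :=
    List.ne_nil_of_mem hfmem
  rcases Option.isSome_iff_exists.mp (List.getLast?_isSome.mpr hne) with ⟨w, hw⟩
  refine ⟨w, hw, ?_⟩
  have : w ∈ files.filter (fun g => PySem.Str.lower g == PySem.Str.lower f) :=
    List.mem_of_getLast? hw
  simpa [List.mem_filter] using (List.mem_filter.mp this).2

theorem pvMem_values (files : List String) (v : String) :
    v ∈ (files.foldl (fun d f => d.insert (PySem.Str.lower f) f) PySem.Dict.empty).values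
    ↔ (files.filter (fun f => PySem.Str.lower f == PySem.Str.lower v)).getLast? = some v := by
  rw [PySem.Dict.values_eq_map_keys _ (pvKeys_nodup files) "", List.mem_map]
  constructor
  · rintro ⟨k, hk, hv⟩
    rcases pvKey_class files k hk with ⟨w, hw, hwk⟩
    rw [pvGetD_foldl_insert, PySem.Dict.getD_empty, hw, Option.getD_some] at hv
    subst hv
    rw [hwk]
    exact hw
  · intro hv
    refine ⟨PySem.Str.lower v, ?_, ?_⟩
    · rw [pvKeys_eq, PySem.Set.mem_ofList, List.mem_map]
      have : v ∈ files.filter (fun f => PySem.Str.lower f == PySem.Str.lower v) :=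
        List.mem_of_getLast? hv
      exact ⟨v, (List.mem_filter.mp this).1, rfl⟩
    · rw [pvGetD_foldl_insert, PySem.Dict.getD_empty, hv, Option.getD_some]

theorem pvValues_nodup (files : List String) :
    (files.foldl (fun d f => d.insert (PySem.Str.lower f) f) PySem.Dict.empty).values.Nodup := by
  have hmap : (files.foldl (fun d f => d.insert (PySem.Str.lower f) f)
      PySem.Dict.empty).values.map (fun v => PySem.Str.lower v)
      = (files.foldl (fun d f => d.insert (PySem.Str.lower f) f) PySem.Dict.empty).keys := by
    rw [PySem.Dict.values_eq_map_keys _ (pvKeys_nodup files) "", List.map_map]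
    refine (List.map_congr_left ?_).trans (List.map_id _)
    intro k hk
    rcases pvKey_class files k hk with ⟨w, hw, hwk⟩
    simp only [Function.comp_apply, pvGetD_foldl_insert, PySem.Dict.getD_empty, hw,
      Option.getD_some, hwk, id]
  exact (hmap ▸ pvKeys_nodup files).of_map _

theorem pvR_subset : ∀ (s : List String) (v : String), v ∈ pvR s → v ∈ s := by
  intro s
  induction s using pvR.induct with
  | case1 => intro v h; simp [pvR] at h
  | case2 f => intro v h; simpa [pvR] using h
  | case3 f g t heq ih =>
    intro v h
    rw [pvR, if_pos heq] at h
    exact List.mem_cons_of_mem _ (ih v h)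
  | case4 f g t hne ih =>
    intro v h
    rw [pvR, if_neg hne] at h
    rcases List.mem_cons.mp h with rfl | h'
    · exact List.mem_cons_self
    · exact List.mem_cons_of_mem _ (ih v h')

theorem pvR_pairwise : ∀ (s : List String),
    s.Pairwise (fun a b => PySem.Str.lower a ≤ PySem.Str.lower b) →
    (pvR s).Pairwise (fun a b => PySem.Str.lower a < PySem.Str.lower b) := by
  intro s
  induction s using pvR.induct with
  | case1 => intro _; simp [pvR]
  | case2 f => intro _; simp [pvR]
  | case3 f g t heq ih =>
    intro h
    rw [pvR, if_pos heq]
    exact ih (List.pairwise_cons.mp h).2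
  | case4 f g t hne ih =>
    intro h
    rcases List.pairwise_cons.mp h with ⟨hf, htail⟩
    have hfg : PySem.Str.lower f < PySem.Str.lower g :=
      lt_of_le_of_ne (hf g List.mem_cons_self) (fun e => hne e.symm)
    rw [pvR, if_neg hne]
    refine List.pairwise_cons.mpr ⟨?_, ih htail⟩
    intro b hb
    have hbmem : b ∈ g :: t := pvR_subset _ b hb
    rcases List.mem_cons.mp hbmem with rfl | hb'
    · exact hfg
    · exact lt_of_lt_of_le hfg ((List.pairwise_cons.mp htail).1 b hb')

theorem pvR_mem : ∀ (s : List String),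
    s.Pairwise (fun a b => PySem.Str.lower a ≤ PySem.Str.lower b) → ∀ (v : String),
    (v ∈ pvR s ↔
      (s.filter (fun f => PySem.Str.lower f == PySem.Str.lower v)).getLast? = some v) := by
  intro s
  induction s using pvR.induct with
  | case1 => intro _ v; simp [pvR]
  | case2 f =>
    intro _ v
    by_cases hfv : PySem.Str.lower f = PySem.Str.lower v
    · simp only [pvR, List.mem_singleton, List.filter_cons, List.filter_nil, hfv,
        beq_self_eq_true, if_true, List.getLast?_singleton, Option.some_inj]
      exact eq_comm
    · have hb : (PySem.Str.lower f == PySem.Str.lower v) = false := by simp [hfv]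
      simp only [pvR, List.mem_singleton, List.filter_cons, List.filter_nil, hb,
        Bool.false_eq_true, if_false, List.getLast?_nil]
      constructor
      · rintro rfl; exact absurd rfl hfv
      · intro h; exact absurd h (by simp)
  | case3 f g t heq ih =>
    intro h v
    have htail := (List.pairwise_cons.mp h).2
    rw [pvR, if_pos heq, ih htail v]
    conv_rhs => rw [List.filter_cons]
    by_cases hfv : PySem.Str.lower f = PySem.Str.lower v
    · have hgmem : g ∈ (g :: t).filter (fun x => PySem.Str.lower x == PySem.Str.lower v) := by
        simp [List.mem_filter, heq.trans hfv]
      have hne : (g :: t).filter (fun x => PySem.Str.lower x == PySem.Str.lower v) ≠ [] :=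
        List.ne_nil_of_mem hgmem
      rcases Option.isSome_iff_exists.mp (List.getLast?_isSome.mpr hne) with ⟨w, hw⟩
      rw [if_pos (by simp [hfv]), List.getLast?_cons, hw]
      simp
    · rw [if_neg (by simp [hfv])]
  | case4 f g t hne ih =>
    intro h v
    rcases List.pairwise_cons.mp h with ⟨hf, htail⟩
    have hfg : PySem.Str.lower f < PySem.Str.lower g :=
      lt_of_le_of_ne (hf g List.mem_cons_self) (fun e => hne e.symm)
    have hclass : ∀ b ∈ g :: t, PySem.Str.lower f < PySem.Str.lower b := by
      intro b hb
      rcases List.mem_cons.mp hb with rfl | hb'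
      · exact hfg
      · exact lt_of_lt_of_le hfg ((List.pairwise_cons.mp htail).1 b hb')
    rw [pvR, if_neg hne, List.filter_cons]
    by_cases hfv : PySem.Str.lower f = PySem.Str.lower v
    · have hnilf :
          (g :: t).filter (fun x => PySem.Str.lower x == PySem.Str.lower v) = [] := by
        rw [List.filter_eq_nil_iff]
        intro b hb
        simp only [beq_iff_eq]
        exact fun e => absurd (hfv ▸ e) (ne_of_gt (hclass b hb))
      rw [if_pos (by simp [hfv]), hnilf]
      simp only [List.getLast?_singleton, Option.some_inj]
      constructor
      · intro hmem
        rcases List.mem_cons.mp hmem with rfl | h'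
        · rfl
        · exact absurd hfv (ne_of_lt (hclass v (pvR_subset _ v h')))
      · rintro rfl; exact List.mem_cons_self
    · rw [if_neg (by simp [hfv])]
      constructor
      · intro hmem
        rcases List.mem_cons.mp hmem with rfl | h'
        · exact absurd rfl hfv
        · exact (ih htail v).mp h'
      · intro h'
        exact List.mem_cons_of_mem _ ((ih htail v).mpr h')

-- ===== VERDICT (by name: the statement is the Claim_ definition above) =====
theorem normalize_soundboard_file_list_py_spec : Claim_equal_normalize_soundboard_file_list_py := by
  intro raw_list _dom
  unfold Spec_normalize_soundboard_file_list_py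
  simp only [normalize_soundboard_file_list_py, normalize_soundboard_file_list_py_alt, pvFiles_eq]
  rw [pvFold_eq_pvR]
  set files := (raw_list.filter pvKeep).map pvNorm with hfiles
  have hpair := PySem.List.sorted_pairwise files (fun v => PySem.Str.lower v)
  have hRpair := pvR_pairwise _ hpair
  have hRnodup : (pvR (PySem.List.sorted files (fun v => PySem.Str.lower v) false)).Nodup :=
    hRpair.imp (fun hlt => by rintro rfl; exact lt_irrefl _ hlt)
  refine PySem.List.sorted_eq_of_perm_of_pairwise_lt _ _ _ ?_ hRpair
  rw [List.perm_ext_iff_of_nodup hRnodup (pvValues_nodup files)]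
  intro v
  rw [pvR_mem _ hpair v, pvSorted_filter, pvMem_values]
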